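-- pv_equiv track=rewrite | github.com/jngcii/python-algorithm | winter_coding_prac/buying_cookie.py | solution
-- ===== SOURCE A (Python) =====
-- def solution(cookie):
--
--     for i in range(len(cookie), 1, -1):
--
--         res = 0
--
--         for j in range(len(cookie) - i + 1):
--
--             c = cookie[j:j+i]
--
--             for q in range(1, len(c)):
--                 if sum(c[:q]) == sum(c[q:]): res = max(res, sum(c[:q]))
--
--         if res != 0: return res
--
--     return 0
-- ===== SOURCE B (Python) =====
-- def solution(cookie):
--     n = len(cookie)
--     pre = [0]
--     for x in cookie:
--         pre.append(pre[-1] + x)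
--     for i in range(n, 1, -1):
--         res = 0
--         for j in range(n - i + 1):
--             for q in range(1, i):
--                 left = pre[j + q] - pre[j]
--                 if left == pre[j + i] - pre[j + q]:
--                     res = max(res, left)
--         if res != 0:
--             return res
--     return 0
-- ===== Notes on version B (the rewrite author's own statement) =====
-- stated objective: faster
-- what changed: B precomputes a prefix-sum array once so each split's left/right sums are O(1) subtractions instead of A's per-split slicing and re-summing of the window.
import Mathlib
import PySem

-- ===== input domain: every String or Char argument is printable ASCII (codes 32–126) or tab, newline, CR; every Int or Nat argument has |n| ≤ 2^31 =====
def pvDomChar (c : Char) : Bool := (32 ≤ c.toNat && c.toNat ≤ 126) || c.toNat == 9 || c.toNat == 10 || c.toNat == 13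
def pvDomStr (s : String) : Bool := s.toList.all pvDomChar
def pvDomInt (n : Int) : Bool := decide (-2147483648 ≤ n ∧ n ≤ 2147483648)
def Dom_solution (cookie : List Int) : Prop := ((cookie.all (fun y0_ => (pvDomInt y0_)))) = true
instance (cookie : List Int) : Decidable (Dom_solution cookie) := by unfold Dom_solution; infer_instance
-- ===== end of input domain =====

-- B replaces A's per-split slice-and-sum with a precomputed prefix-sum array (objective: faster).


-- ===== PORT A =====
-- inner 'for q in range(1, len(c))' loop of A
def solnA_q (c : List Int) (res : Int) : Int :=
  (PySem.List.pyRange 1 (c.length : Int) 1).foldl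
    (fun res q =>
      if (PySem.List.slice c none (some q)).sum = (PySem.List.slice c (some q) none).sum
      then max res (PySem.List.slice c none (some q)).sum else res) res

-- middle 'for j in range(len(cookie) - i + 1)' loop of A
def solnA_j (cookie : List Int) (i : Int) : Int :=
  (PySem.List.pyRange 0 ((cookie.length : Int) - i + 1) 1).foldl
    (fun res j => solnA_q (PySem.List.slice cookie (some j) (some (j + i))) res) 0

-- outer 'for i in range(len(cookie), 1, -1)' loop of A with its early return
def solnA_loop (cookie : List Int) : List Int → Int
  | [] => 0
  | i :: rest =>
    let res := solnA_j cookie i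
    if res ≠ 0 then res else solnA_loop cookie rest

def solution (cookie : List Int) : Int :=
  solnA_loop cookie (PySem.List.pyRange (cookie.length : Int) 1 (-1))

-- ===== PORT B =====
-- 'pre = [0]; for x in cookie: pre.append(pre[-1] + x)'
def solnB_pre (cookie : List Int) : List Int :=
  cookie.foldl (fun pre x => pre ++ [PySem.List.pyGetD pre (-1) 0 + x]) [0]

-- inner 'for q in range(1, i)' loop of B: split sums from the prefix array
def solnB_q (pre : List Int) (i j : Int) (res0 : Int) : Int :=
  (PySem.List.pyRange 1 i 1).foldl
    (fun res q =>
      let left := PySem.List.pyGetD pre (j + q) 0 - PySem.List.pyGetD pre j 0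
      if left = PySem.List.pyGetD pre (j + i) 0 - PySem.List.pyGetD pre (j + q) 0
      then max res left else res) res0

-- middle 'for j in range(n - i + 1)' loop of B
def solnB_j (n : Int) (pre : List Int) (i : Int) : Int :=
  (PySem.List.pyRange 0 (n - i + 1) 1).foldl (fun res j => solnB_q pre i j res) 0

-- outer 'for i in range(n, 1, -1)' loop of B with its early return
def solnB_loop (n : Int) (pre : List Int) : List Int → Int
  | [] => 0
  | i :: rest =>
    let res := solnB_j n pre i
    if res ≠ 0 then res else solnB_loop n pre rest

def solution_alt (cookie : List Int) : Int :=
  solnB_loop (cookie.length : Int) (solnB_pre cookie) (PySem.List.pyRange (cookie.length : Int) 1 (-1))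

-- ===== PRECONDITION & SPEC =====
def Spec_solution (cookie : List Int) (out : Int) : Prop := out = solution_alt cookie
instance (cookie : List Int) (out : Int) : Decidable (Spec_solution cookie out) := by unfold Spec_solution; infer_instance

-- ===== CLAIM (what is proved, stated in full; the proofs are below) =====
def Claim_equal_solution : Prop := ∀ (cookie : List Int), Dom_solution cookie → Spec_solution cookie (solution cookie)

-- ===== LEMMAS AND PROOFS =====

-- B's append loop builds the scanl of running sums
lemma solnB_pre_aux : ∀ (l acc : List Int) (a : Int),
    List.foldl (fun pre x => pre ++ [PySem.List.pyGetD pre (-1) 0 + x]) (acc ++ [a]) l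
      = acc ++ List.scanl (· + ·) a l := by
  intro l
  induction l with
  | nil => intro acc a; simp [List.scanl]
  | cons x t ih =>
    intro acc a
    rw [List.foldl_cons]
    simp only [PySem.List.pyGetD_neg_one_append_singleton]
    rw [List.append_assoc] at *
    have h := ih (acc ++ [a]) (a + x)
    simp only [List.append_assoc] at h
    simpa [List.scanl] using h

lemma solnB_pre_eq (cookie : List Int) : solnB_pre cookie = List.scanl (· + ·) 0 cookie := by
  have h := solnB_pre_aux cookie [] 0
  simpa [solnB_pre] using h

lemma scanl_getD : ∀ (l : List Int) (a : Int) (k : Nat), k ≤ l.length →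
    (List.scanl (· + ·) a l).getD k 0 = a + (l.take k).sum := by
  intro l
  induction l with
  | nil =>
    intro a k hk
    simp at hk
    subst hk
    simp [List.scanl]
  | cons x t ih =>
    intro a k hk
    cases k with
    | zero => simp [List.scanl]
    | succ k =>
      rw [List.scanl_cons, List.getD_cons_succ, ih (a + x) k (by simpa using hk)]
      simp [List.sum_cons]; ring

-- the prefix array at a Nat index is the sum of the first k cookies
lemma pre_lookup (cookie : List Int) (k : Nat) (hk : k ≤ cookie.length) :
    PySem.List.pyGetD (solnB_pre cookie) ((k : Nat) : Int) 0 = (cookie.take k).sum := by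
  rw [solnB_pre_eq, PySem.List.pyGetD_natCast, scanl_getD cookie 0 k hk]
  ring

lemma sum_take_drop (l : List Int) (a b : Nat) :
    ((l.drop a).take b).sum = (l.take (a + b)).sum - (l.take a).sum := by
  rw [List.take_add, List.sum_append]
  ring

-- the window slice has length i
lemma window_len (cookie : List Int) (jn iN : Nat) (hji : jn + iN ≤ cookie.length) :
    (((PySem.List.slice cookie (some (jn : Int)) (some ((jn : Int) + (iN : Int)))).length : Nat) : Int)
      = (iN : Int) := by
  rw [PySem.List.slice_natCast_add]
  simp only [List.length_take, List.length_drop]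
  congr 1
  omega

-- left split sum of the window = prefix difference
lemma window_left (cookie : List Int) (jn iN qn : Nat) (hqi : qn ≤ iN)
    (hji : jn + iN ≤ cookie.length) :
    (PySem.List.slice (PySem.List.slice cookie (some (jn : Int)) (some ((jn : Int) + (iN : Int)))) none (some (qn : Int))).sum
      = PySem.List.pyGetD (solnB_pre cookie) ((jn : Int) + (qn : Int)) 0
        - PySem.List.pyGetD (solnB_pre cookie) ((jn : Int)) 0 := by
  rw [PySem.List.slice_natCast_add, PySem.List.slice_to_natCast, List.take_take,
    Nat.min_eq_left hqi, sum_take_drop]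
  have h1 : ((jn : Int) + (qn : Int)) = (((jn + qn : Nat)) : Int) := by push_cast; ring
  rw [h1, pre_lookup cookie (jn + qn) (by omega), pre_lookup cookie jn (by omega)]

-- right split sum of the window = prefix difference
lemma window_right (cookie : List Int) (jn iN qn : Nat) (hqi : qn ≤ iN)
    (hji : jn + iN ≤ cookie.length) :
    (PySem.List.slice (PySem.List.slice cookie (some (jn : Int)) (some ((jn : Int) + (iN : Int)))) (some (qn : Int)) none).sum
      = PySem.List.pyGetD (solnB_pre cookie) ((jn : Int) + (iN : Int)) 0
        - PySem.List.pyGetD (solnB_pre cookie) ((jn : Int) + (qn : Int)) 0 := by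
  rw [PySem.List.slice_natCast_add, PySem.List.slice_from_natCast, List.drop_take]
  have hdd : List.drop qn (List.drop jn cookie) = List.drop (jn + qn) cookie := by
    rw [List.drop_drop]
  rw [hdd, sum_take_drop]
  have h2 : jn + qn + (iN - qn) = jn + iN := by omega
  rw [h2]
  have h1 : ((jn : Int) + (qn : Int)) = (((jn + qn : Nat)) : Int) := by push_cast; ring
  have h3 : ((jn : Int) + (iN : Int)) = (((jn + iN : Nat)) : Int) := by push_cast; ring
  rw [h1, h3, pre_lookup cookie (jn + iN) (by omega), pre_lookup cookie (jn + qn) (by omega)]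

-- A's inner q-loop over the window equals B's inner q-loop over the prefix array
lemma solnA_q_eq (cookie : List Int) (jn iN : Nat) (hji : jn + iN ≤ cookie.length) (res : Int) :
    solnA_q (PySem.List.slice cookie (some (jn : Int)) (some ((jn : Int) + (iN : Int)))) res
      = solnB_q (solnB_pre cookie) (iN : Int) (jn : Int) res := by
  unfold solnA_q solnB_q
  rw [window_len cookie jn iN hji]
  apply PySem.List.foldl_congr_mem
  intro acc q hq
  rw [PySem.List.mem_pyRange_one] at hq
  obtain ⟨qn, rfl⟩ : ∃ m : Nat, q = (m : Int) := ⟨q.toNat, by omega⟩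
  have hqi : qn ≤ iN := by
    have := hq.2
    omega
  simp only [window_left cookie jn iN qn hqi hji, window_right cookie jn iN qn hqi hji]

-- A's j-loop equals B's j-loop
lemma solnA_j_eq (cookie : List Int) (iN : Nat) (_hiN : iN ≤ cookie.length) :
    solnA_j cookie (iN : Int) = solnB_j ((cookie.length : Nat) : Int) (solnB_pre cookie) (iN : Int) := by
  unfold solnA_j solnB_j
  apply PySem.List.foldl_congr_mem
  intro acc j hj
  rw [PySem.List.mem_pyRange_one] at hj
  obtain ⟨jn, rfl⟩ : ∃ m : Nat, j = (m : Int) := ⟨j.toNat, by omega⟩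
  have hji : jn + iN ≤ cookie.length := by
    have := hj.2
    omega
  exact solnA_q_eq cookie jn iN hji acc

-- the outer early-return loops agree size by size
lemma loop_eq (cookie : List Int) : ∀ L : List Int,
    (∀ i ∈ L, ∃ m : Nat, i = (m : Int) ∧ m ≤ cookie.length) →
    solnA_loop cookie L = solnB_loop ((cookie.length : Nat) : Int) (solnB_pre cookie) L := by
  intro L
  induction L with
  | nil => intro _; rfl
  | cons i t ih =>
    intro h
    obtain ⟨m, rfl, hm⟩ := h i (by simp)
    simp only [solnA_loop, solnB_loop, solnA_j_eq cookie m hm]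
    rw [ih (fun x hx => h x (List.mem_cons_of_mem _ hx))]

-- ===== VERDICT (by name: the statement is the Claim_ definition above) =====
theorem solution_spec : Claim_equal_solution := by
  intro cookie _
  unfold Spec_solution solution solution_alt
  apply loop_eq
  intro i hi
  rw [PySem.List.mem_pyRange_neg_one] at hi
  exact ⟨i.toNat, by omega, by omega⟩
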